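-- pv_equiv track=rewrite | github.com/Pixtane/social-choice | saari_triangle.py | has_conflicting_results
-- ===== SOURCE A (Python) =====
-- def has_conflicting_results(results_dict, index):
--     """
--     Check if different voting rules give different winners for a point.
--     """
--     winners = []
--     for rule_name, winners_list in results_dict.items():
--         if index < len(winners_list):
--             winner = winners_list[index]
--             if winner is not None:
--                 winners.append(winner)
--
--     # Conflicting if we have more than one unique winner
--     return len(set(winners)) > 1
-- ===== SOURCE B (Python) =====
-- def has_conflicting_results(results_dict, index):
--     """Single short-circuiting pass: remember the first qualifying winner and
--     return True as soon as a different one appears."""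
--     first = None
--     for winners_list in results_dict.values():
--         if index < len(winners_list):
--             winner = winners_list[index]
--             if winner is not None:
--                 if first is None:
--                     first = winner
--                 elif winner != first:
--                     return True
--     return False
-- ===== Notes on version B (the rewrite author's own statement) =====
-- stated objective: alternative
-- what changed: B replaces A's build-a-list-then-dedup-with-set pass by a single short-circuiting scan that keeps only the first qualifying winner and returns True the moment a different one is seen.
-- outside the precondition, e.g. on has_conflicting_results({'a': ['x', 'y']}, -5): A raises IndexError, B raises IndexError
import Mathlib
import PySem

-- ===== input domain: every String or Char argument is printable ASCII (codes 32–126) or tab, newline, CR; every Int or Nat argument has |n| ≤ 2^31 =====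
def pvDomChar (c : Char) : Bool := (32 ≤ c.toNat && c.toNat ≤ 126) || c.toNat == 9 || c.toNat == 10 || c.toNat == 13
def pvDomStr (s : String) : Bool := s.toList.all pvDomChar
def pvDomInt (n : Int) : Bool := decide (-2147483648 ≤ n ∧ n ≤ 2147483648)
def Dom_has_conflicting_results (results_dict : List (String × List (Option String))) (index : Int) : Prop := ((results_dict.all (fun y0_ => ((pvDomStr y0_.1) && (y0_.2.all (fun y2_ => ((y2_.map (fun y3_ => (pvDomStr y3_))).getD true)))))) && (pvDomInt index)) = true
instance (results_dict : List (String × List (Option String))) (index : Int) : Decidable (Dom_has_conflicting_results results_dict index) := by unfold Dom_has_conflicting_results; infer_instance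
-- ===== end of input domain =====

-- B replaces A's collect-all-winners-then-count-distinct pass by a single
-- short-circuiting scan with one remembered "first winner" (objective: alternative).

-- ===== PORT A =====
def has_conflicting_results (results_dict : List (String × List (Option String))) (index : Int) : Bool :=
  let winners : List String := results_dict.foldl (fun acc p =>
    if index < (p.2.length : Int) then
      -- winner = winners_list[index]; Pre_ excludes the IndexError case (pyGet? = none)
      match (PySem.List.pyGet? p.2 index).getD none with
      | some w => acc ++ [w]
      | none => acc
    else acc) []
  decide ((PySem.Set.ofList winners).length > 1)

-- ===== PORT B =====
def hcrGo (index : Int) (first : Option String) : List (String × List (Option String)) → Bool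
  | [] => false
  | (_, ws) :: rest =>
    if index < (ws.length : Int) then
      match (PySem.List.pyGet? ws index).getD none with
      | some w =>
        match first with
        | none => hcrGo index (some w) rest
        | some f => if w ≠ f then true else hcrGo index (some f) rest
      | none => hcrGo index first rest
    else hcrGo index first rest

def has_conflicting_results_alt (results_dict : List (String × List (Option String))) (index : Int) : Bool :=
  hcrGo index none results_dict

-- ===== PRECONDITION & SPEC =====
-- Pre_ excludes exactly the inputs where winners_list[index] raises IndexError
-- (index < len but index < -len); both A and B raise there.
def Pre_has_conflicting_results (results_dict : List (String × List (Option String))) (index : Int) : Prop :=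
  ∀ p ∈ results_dict, index < (p.2.length : Int) → -(p.2.length : Int) ≤ index

instance (results_dict : List (String × List (Option String))) (index : Int) : Decidable (Pre_has_conflicting_results results_dict index) := by unfold Pre_has_conflicting_results; infer_instance

def pvWitness_has_conflicting_results : (List (String × List (Option String))) × Int :=
  ([("plurality", [some "x", some "y"]), ("borda", [some "z", none])], 0)

def Spec_has_conflicting_results (results_dict : List (String × List (Option String))) (index : Int) (out : Bool) : Prop := out = has_conflicting_results_alt results_dict index
instance (results_dict : List (String × List (Option String))) (index : Int) (out : Bool) : Decidable (Spec_has_conflicting_results results_dict index out) := by unfold Spec_has_conflicting_results; infer_instance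

-- ===== CLAIM (what is proved, stated in full; the proofs are below) =====
def Claim_equal_has_conflicting_results : Prop := ∀ (results_dict : List (String × List (Option String))) (index : Int), Dom_has_conflicting_results results_dict index → Pre_has_conflicting_results results_dict index → Spec_has_conflicting_results results_dict index (has_conflicting_results results_dict index)

-- ===== LEMMAS AND PROOFS =====

-- the multiset of winners both programs filter out, as a pure function
def hcrPick (index : Int) (ws : List (Option String)) : List String :=
  if index < (ws.length : Int) then
    match (PySem.List.pyGet? ws index).getD none with
    | some w => [w]
    | none => []
  else []

def hcrW (index : Int) (rd : List (String × List (Option String))) : List String :=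
  rd.flatMap (fun p => hcrPick index p.2)

-- pure version of B's scan
def hcrChk : Option String → List String → Bool
  | _, [] => false
  | none, w :: ws => hcrChk (some w) ws
  | some f, w :: ws => if w ≠ f then true else hcrChk (some f) ws

theorem hcrA_foldl (index : Int) (rd : List (String × List (Option String))) (acc : List String) :
    rd.foldl (fun acc p =>
      if index < (p.2.length : Int) then
        match (PySem.List.pyGet? p.2 index).getD none with
        | some w => acc ++ [w]
        | none => acc
      else acc) acc = acc ++ hcrW index rd := by
  induction rd generalizing acc with
  | nil => simp [hcrW]
  | cons p rest ih =>
    simp only [List.foldl_cons, hcrW, List.flatMap_cons, ih, hcrPick]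
    split
    · cases h : (PySem.List.pyGet? p.2 index).getD none <;> simp
    · simp

theorem hcrGo_eq_chk (index : Int) (first : Option String) (rd : List (String × List (Option String))) :
    hcrGo index first rd = hcrChk first (hcrW index rd) := by
  induction rd generalizing first with
  | nil => cases first <;> simp [hcrGo, hcrW, hcrChk]
  | cons p rest ih =>
    simp only [hcrGo, hcrW, List.flatMap_cons, hcrPick]
    split
    · cases h : (PySem.List.pyGet? p.2 index).getD none with
      | none => simpa [hcrW] using ih first
      | some w =>
        cases first with
        | none => simpa [hcrChk, hcrW] using ih (some w)
        | some f =>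
          by_cases hwf : w = f <;> simp [hcrChk, hwf, hcrW, hcrPick, ih]
    · simpa [hcrW] using ih first

theorem hcrChk_some (f : String) (ls : List String) :
    hcrChk (some f) ls = ls.any (fun x => x ≠ f) := by
  induction ls with
  | nil => simp [hcrChk]
  | cons w ws ih => by_cases h : w = f <;> simp [hcrChk, h, ih]

theorem set_len_gt_one (ls : List String) :
    decide ((PySem.Set.ofList ls).length > 1) = decide (∃ a ∈ ls, ∃ b ∈ ls, a ≠ b) := by
  rcases h : PySem.Set.ofList ls with _ | ⟨a, _ | ⟨b, t⟩⟩
  · have : ∀ x, x ∉ ls := by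
      intro x hx
      have := (PySem.Set.mem_ofList (xs := ls) (y := x)).2 hx
      simp [h] at this
    rw [decide_eq_decide]
    constructor
    · intro hlen; simp at hlen
    · rintro ⟨a, ha, -⟩; exact absurd ha (this a)
  · have hmem : ∀ x, x ∈ ls → x = a := by
      intro x hx
      have := (PySem.Set.mem_ofList (xs := ls) (y := x)).2 hx
      simpa [h] using this
    simp only [List.length_cons, List.length_nil]
    simp only [decide_eq_decide]
    constructor
    · omega
    · rintro ⟨x, hx, y, hy, hxy⟩
      exact absurd ((hmem x hx).trans (hmem y hy).symm) hxy
  · have hnd := PySem.Set.nodup_ofList (xs := ls)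
    rw [h] at hnd
    have hab : a ≠ b := by simp [List.nodup_cons] at hnd; tauto
    have hma : a ∈ ls := (PySem.Set.mem_ofList (xs := ls) (y := a)).1 (by simp [h])
    have hmb : b ∈ ls := (PySem.Set.mem_ofList (xs := ls) (y := b)).1 (by simp [h, List.mem_cons])
    simp only [List.length_cons]
    simp only [decide_eq_decide]
    constructor
    · intro _; exact ⟨a, hma, b, hmb, hab⟩
    · intro _; omega

theorem hcrChk_none (ls : List String) :
    hcrChk none ls = decide ((PySem.Set.ofList ls).length > 1) := by
  rw [set_len_gt_one]
  cases ls with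
  | nil => simp [hcrChk]
  | cons w ws =>
    rw [show hcrChk none (w :: ws) = hcrChk (some w) ws from rfl, hcrChk_some]
    have hany : (ws.any fun x => x ≠ w) = decide (∃ x ∈ ws, x ≠ w) := by rw [Bool.eq_iff_iff]; simp
    rw [hany, decide_eq_decide]
    constructor
    · rintro ⟨x, hx, hxw⟩
      exact ⟨w, by simp, x, by simp [hx], by simpa using fun e => hxw e.symm⟩
    · rintro ⟨a, ha, b, hb, hab⟩
      rcases List.mem_cons.1 ha with rfl | ha'
      · rcases List.mem_cons.1 hb with rfl | hb'
        · exact absurd rfl hab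
        · exact ⟨b, hb', by simpa using fun e => hab e.symm⟩
      · rcases List.mem_cons.1 hb with rfl | hb'
        · exact ⟨a, ha', by simpa using hab⟩
        · by_cases haw : a = w
          · subst haw; exact ⟨b, hb', by simpa using fun e => hab e.symm⟩
          · exact ⟨a, ha', by simpa using haw⟩

-- ===== VERDICT (by name: the statement is the Claim_ definition above) =====
theorem has_conflicting_results_spec : Claim_equal_has_conflicting_results := by
  intro rd index _ _
  show has_conflicting_results rd index = has_conflicting_results_alt rd index
  rw [has_conflicting_results, has_conflicting_results_alt, hcrGo_eq_chk, hcrChk_none]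
  simp only [hcrA_foldl, List.nil_append]
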